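-- pv_equiv track=rewrite | github.com/Runarok/GeeksForGeeks-solutions | Difficulty: Easy/Maximize XOR/maximize-xor.py | maximize_xor_count
-- ===== SOURCE A (Python) =====
-- def maximize_xor_count(n):
--     i = 1  # Initialize i to 1 (this will represent powers of 2)
--     count = 0  # Initialize count to 0 to accumulate the XOR values
--
--     # While n is greater than 0, continue processing its bits
--     while(n > 0):
--         # Check if the least significant bit of n is 0
--         if(not(n & 1)):
--             count += i  # Add the value of i to count if the bit is 0
--         n = n >> 1  # Right shift n to process the next bit
--         i = i * 2  # Double i for the next power of 2
--
--     return count  # Return the total XOR count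
-- ===== SOURCE B (Python) =====
-- def maximize_xor_count(n):
--     # Closed form: sum of powers of two at n's zero-bit positions (below the top set bit)
--     # equals the all-ones mask up to n's bit length minus n.
--     if n <= 0:
--         return 0
--     return (1 << n.bit_length()) - 1 - n
-- ===== Notes on version B (the rewrite author's own statement) =====
-- stated objective: simpler
-- what changed: Replaced the bit-by-bit accumulation loop with the closed form (1 << n.bit_length()) - 1 - n (the all-ones mask minus n), with a guard for the non-positive case where A's loop never runs.
import Mathlib
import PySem

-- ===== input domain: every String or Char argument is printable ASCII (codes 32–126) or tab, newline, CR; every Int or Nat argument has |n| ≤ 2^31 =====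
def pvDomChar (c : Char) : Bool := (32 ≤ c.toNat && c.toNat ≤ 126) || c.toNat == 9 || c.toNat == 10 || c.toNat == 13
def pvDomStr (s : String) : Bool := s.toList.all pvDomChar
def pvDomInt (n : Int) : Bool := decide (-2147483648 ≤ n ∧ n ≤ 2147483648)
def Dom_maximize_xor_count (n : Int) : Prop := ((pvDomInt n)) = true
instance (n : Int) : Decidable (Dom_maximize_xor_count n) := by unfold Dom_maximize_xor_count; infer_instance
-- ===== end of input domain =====

-- B replaces A's bit-by-bit loop with the closed form (1 << n.bit_length()) - 1 - n (simpler).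

-- ===== PORT A =====
-- the while loop of A: state (n, i, count); n>0 tested, low bit added, n >>= 1, i *= 2
def pvXorLoop (n i count : Int) : Int :=
  if _h : n > 0 then
    pvXorLoop (n >>> (1:Nat)) (i * 2) (if PySem.Int.band n 1 == 0 then count + i else count)
  else count
termination_by n.toNat
decreasing_by
  simp only [Int.shiftRight_eq_div_pow, pow_one]
  omega

def maximize_xor_count (n : Int) : Int := pvXorLoop n 1 0

-- ===== PORT B =====
def maximize_xor_count_alt (n : Int) : Int :=
  if n ≤ 0 then 0 else ((1:Int) <<< PySem.Int.bitLength n) - 1 - n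

-- ===== PRECONDITION & SPEC =====
def Spec_maximize_xor_count (n : Int) (out : Int) : Prop := out = maximize_xor_count_alt n
instance (n : Int) (out : Int) : Decidable (Spec_maximize_xor_count n out) := by unfold Spec_maximize_xor_count; infer_instance

-- ===== CLAIM (what is proved, stated in full; the proofs are below) =====
def Claim_equal_maximize_xor_count : Prop := ∀ (n : Int), Dom_maximize_xor_count n → Spec_maximize_xor_count n (maximize_xor_count n)

-- ===== LEMMAS AND PROOFS =====

lemma pvXorLoop_closed : ∀ (k : Nat) (n i c : Int), 0 ≤ n → n.toNat ≤ k →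
    pvXorLoop n i c = c + i * ((2:Int) ^ PySem.Int.bitLength n - 1 - n) := by
  intro k
  induction k with
  | zero =>
    intro n i c hn hk
    have hn0 : n = 0 := by omega
    subst hn0
    rw [pvXorLoop]
    simp [PySem.Int.bitLength_zero]
  | succ k ih =>
    intro n i c hn hk
    by_cases h : n > 0
    · rw [pvXorLoop]
      simp only [h, dite_true]
      have hsh : n >>> (1:Nat) = n / 2 := by
        rw [Int.shiftRight_eq_div_pow]; norm_num
      rw [hsh, ih (n / 2) _ _ (by omega) (by omega)]
      have hb : PySem.Int.bitLength n = PySem.Int.bitLength (n / 2) + 1 := by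
        rw [PySem.Int.bitLength_of_pos h, PySem.Int.floordiv_eq_ediv_of_pos (by norm_num)]
      have hband : PySem.Int.band n 1 = n % 2 := by
        rw [PySem.Int.band_one, PySem.Int.mod_eq_emod_of_pos (by norm_num)]
      rw [hb, hband, pow_succ]
      rcases (by omega : n % 2 = 0 ∨ n % 2 = 1) with h2 | h2
      · simp only [h2]; norm_num
        have he : 2 * (n / 2) = n := by omega
        linear_combination (-i) * he
      · simp only [h2]; norm_num
        have he : 2 * (n / 2) + 1 = n := by omega
        linear_combination (-i) * he
    · rw [pvXorLoop]
      have hn0 : n = 0 := by omega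
      subst hn0
      simp [PySem.Int.bitLength_zero]

-- ===== VERDICT (by name: the statement is the Claim_ definition above) =====
theorem maximize_xor_count_spec : Claim_equal_maximize_xor_count := by
  intro n _
  unfold Spec_maximize_xor_count maximize_xor_count maximize_xor_count_alt
  by_cases h : n ≤ 0
  · rw [pvXorLoop]
    simp [h, show ¬ n > 0 by omega]
  · rw [pvXorLoop_closed n.toNat n 1 0 (by omega) le_rfl]
    simp only [h, if_false, Int.shiftLeft_eq]
    ring
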